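-- pv_equiv track=rewrite | github.com/Dobrowit/X-FILES | x-files.py | matrix_to_list
-- ===== SOURCE A (Python) =====
-- def matrix_to_list(matrix):
--     enumerated_list = []
--     counter = 1
--     for col in range(len(matrix[0])):  # Iterujemy po kolumnach
--         for row in range(len(matrix)):  # Iterujemy po wierszach
--             enumerated_list.append((counter, matrix[row][col]))
--             counter += 1
--     return enumerated_list
-- ===== SOURCE B (Python) =====
-- def matrix_to_list(matrix):
--     ncols = len(matrix[0])
--     def go(m, counter, remaining):
--         if remaining == 0:
--             return []
--         head = [(counter + i, row[0]) for i, row in enumerate(m)]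
--         return head + go([row[1:] for row in m], counter + len(m), remaining - 1)
--     return go(matrix, 1, ncols)
-- ===== Notes on version B (the rewrite author's own statement) =====
-- stated objective: alternative
-- what changed: Replaces index arithmetic over two nested range() loops and a mutable counter with structural recursion that peels one column per step (numbering the rows' first elements via enumerate, then recursing on the row tails).
import Mathlib
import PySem

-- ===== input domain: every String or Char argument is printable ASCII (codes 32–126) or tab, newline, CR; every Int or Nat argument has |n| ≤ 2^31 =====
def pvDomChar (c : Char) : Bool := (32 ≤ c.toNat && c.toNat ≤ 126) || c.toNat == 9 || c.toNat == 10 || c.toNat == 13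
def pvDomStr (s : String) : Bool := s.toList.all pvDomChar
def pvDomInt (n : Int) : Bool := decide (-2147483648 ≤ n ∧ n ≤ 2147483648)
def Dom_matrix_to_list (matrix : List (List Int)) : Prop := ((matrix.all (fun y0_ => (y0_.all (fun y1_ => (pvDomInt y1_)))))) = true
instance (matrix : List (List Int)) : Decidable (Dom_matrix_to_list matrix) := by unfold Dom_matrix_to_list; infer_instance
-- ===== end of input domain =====

-- B replaces the nested index loops with structural recursion that peels off one column at a
-- time (numbering the first elements, then recursing on the row tails); same cost, alternative.

-- ===== PORT A =====
-- nested loops over range(len(matrix[0])) and range(len(matrix)), appending (counter, matrix[row][col])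
def matrix_to_list (matrix : List (List Int)) : List (Int × Int) :=
  ((PySem.List.pyRange 0 ((PySem.List.pyGetD matrix 0 []).length : Int) 1).foldl
    (fun st col =>
      (PySem.List.pyRange 0 ((matrix.length : Nat) : Int) 1).foldl
        (fun st2 row =>
          (st2.1 ++ [(st2.2, PySem.List.pyGetD (PySem.List.pyGetD matrix row []) col 0)], st2.2 + 1))
        st)
    ([], 1)).1

-- ===== PORT B =====
-- go(m, counter, remaining): head = [(counter+i, row[0]) for i,row in enumerate(m)], then recurse
-- on [row[1:] for row in m].  row[0] is ported as headD 0 (exact: inside Pre_ every row reached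
-- here is nonempty) and row[1:] as List.drop 1 (exact).
def goB (m : List (List Int)) (counter : Int) (remaining : Nat) : List (Int × Int) :=
  match remaining with
  | 0 => []
  | r + 1 =>
    ((PySem.List.enumerate m 0).map (fun p => (counter + p.1, p.2.headD 0)))
      ++ goB (m.map (fun row => row.drop 1)) (counter + m.length) r

-- len(matrix[0]) ported as (matrix.headD []).length (exact: inside Pre_ matrix is nonempty)
def matrix_to_list_alt (matrix : List (List Int)) : List (Int × Int) :=
  goB matrix 1 (matrix.headD []).length

-- ===== PRECONDITION & SPEC =====
-- Pre_ admits exactly the inputs on which Python A returns: a nonempty matrix whose every row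
-- has at least len(matrix[0]) elements (otherwise matrix[0] or matrix[row][col] raises IndexError).
def Pre_matrix_to_list (matrix : List (List Int)) : Prop :=
  matrix ≠ [] ∧ ∀ r ∈ matrix, (matrix.headD []).length ≤ r.length
instance (matrix : List (List Int)) : Decidable (Pre_matrix_to_list matrix) := by
  unfold Pre_matrix_to_list; infer_instance
def pvWitness_matrix_to_list : List (List Int) := [[1, 2], [3, 4]]

def Spec_matrix_to_list (matrix : List (List Int)) (out : List (Int × Int)) : Prop :=
  out = matrix_to_list_alt matrix
instance (matrix : List (List Int)) (out : List (Int × Int)) : Decidable (Spec_matrix_to_list matrix out) := by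
  unfold Spec_matrix_to_list; infer_instance

-- ===== CLAIM (what is proved, stated in full; the proofs are below) =====
def Claim_equal_matrix_to_list : Prop := ∀ (matrix : List (List Int)), Dom_matrix_to_list matrix → Pre_matrix_to_list matrix → Spec_matrix_to_list matrix (matrix_to_list matrix)

-- ===== LEMMAS AND PROOFS =====

-- numbering a flat list of values from a starting counter
def numFrom : Int → List Int → List (Int × Int)
  | _, [] => []
  | c, v :: vs => (c, v) :: numFrom (c + 1) vs

-- the column-major reading of m, first n columns
def colsOf (m : List (List Int)) (n : Nat) : List (List Int) :=
  (List.range n).map (fun j => m.map (fun r => r.getD j 0))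

theorem numFrom_append (xs ys : List Int) : ∀ c,
    numFrom c (xs ++ ys) = numFrom c xs ++ numFrom (c + xs.length) ys := by
  induction xs with
  | nil => intro c; simp [numFrom]
  | cons x t ih =>
    intro c
    simp only [List.cons_append, numFrom, ih, List.length_cons]
    refine congrArg _ (congrArg₂ _ rfl (congrArg₂ _ ?_ rfl))
    push_cast; ring

-- the inner loop of A numbers one column
theorem colFold (col : List Int) : ∀ (st : List (Int × Int) × Int),
    col.foldl (fun s v => (s.1 ++ [(s.2, v)], s.2 + 1)) st
      = (st.1 ++ numFrom st.2 col, st.2 + col.length) := by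
  induction col with
  | nil => intro st; simp [numFrom]
  | cons v t ih =>
    intro st
    simp only [List.foldl_cons, ih, numFrom, List.length_cons]
    refine congrArg₂ _ ?_ ?_
    · simp
    · push_cast; ring

-- the outer loop of A numbers the flattened columns
theorem outerFold (cols : List (List Int)) : ∀ (st : List (Int × Int) × Int),
    cols.foldl (fun st col => col.foldl (fun s v => (s.1 ++ [(s.2, v)], s.2 + 1)) st) st
      = (st.1 ++ numFrom st.2 cols.flatten, st.2 + cols.flatten.length) := by
  induction cols with
  | nil => intro st; simp [numFrom]
  | cons c t ih =>
    intro st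
    simp only [List.foldl_cons]
    rw [colFold, ih, List.flatten_cons, numFrom_append]
    have h2 : st.2 + (c.length : Int) + (t.flatten.length : Int)
        = st.2 + (((c.length + t.flatten.length : Nat)) : Int) := by push_cast; ring
    rw [List.append_assoc, h2]
    simp

theorem enum_numFrom (m : List (List Int)) : ∀ (c s : Int),
    (PySem.List.enumerate m s).map (fun p => (c + p.1, p.2.headD 0))
      = numFrom (c + s) (m.map (fun r => r.headD 0)) := by
  induction m with
  | nil => intro c s; simp [PySem.List.enumerate_nil, numFrom]
  | cons r t ih =>
    intro c s
    simp only [PySem.List.enumerate_cons, List.map_cons, numFrom, ih]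
    have h1 : c + (s + 1) = c + s + 1 := by ring
    rw [h1]

-- B's recursion produces the numbered flatten of the first n columns
theorem goB_eq (n : Nat) : ∀ (m : List (List Int)) (c : Int),
    (∀ r ∈ m, n ≤ r.length) →
    goB m c n = numFrom c (colsOf m n).flatten := by
  induction n with
  | zero => intro m c _; simp [goB, colsOf, numFrom]
  | succ k ih =>
    intro m c hlen
    have hne : ∀ r ∈ m, r ≠ [] := by
      intro r hr hnil; have := hlen r hr; simp [hnil] at this
    rw [goB]
    have hhead : (PySem.List.enumerate m 0).map (fun p => (c + p.1, p.2.headD 0))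
        = numFrom c (m.map (fun r => r.getD 0 0)) := by
      rw [enum_numFrom, add_zero]
      refine congrArg _ (List.map_congr_left ?_)
      intro r hr
      cases r with
      | nil => exact absurd rfl (hne _ hr)
      | cons x xs => simp
    have hrec : goB (m.map (fun row => row.drop 1)) (c + m.length) k
        = numFrom (c + m.length)
            ((List.range k).map (fun j => m.map (fun r => r.getD (j + 1) 0))).flatten := by
      rw [ih]
      · unfold colsOf
        have hmaps : (List.range k).map (fun j => (m.map (fun row => row.drop 1)).map (fun r => r.getD j 0))
            = (List.range k).map (fun j => m.map (fun r => r.getD (j + 1) 0)) := by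
          refine List.map_congr_left ?_
          intro j _
          rw [List.map_map]
          refine List.map_congr_left ?_
          intro r _
          simp only [Function.comp]
          cases r with
          | nil => simp
          | cons x xs => simp
        rw [hmaps]
      · intro r hr
        simp only [List.mem_map] at hr
        obtain ⟨s, hs, rfl⟩ := hr
        have := hlen s hs
        simp only [List.length_drop]; omega
    rw [hhead, hrec]
    unfold colsOf
    rw [List.range_succ_eq_map, List.map_cons, List.flatten_cons, numFrom_append,
      List.length_map, List.map_map]
    have hmaps : (List.range k).map ((fun j => m.map (fun r => r.getD j 0)) ∘ Nat.succ)
        = (List.range k).map (fun j => m.map (fun r => r.getD (j + 1) 0)) := by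
      refine List.map_congr_left ?_
      intro j _
      simp [Function.comp]
    rw [hmaps]

theorem matrix_to_list_spec : Claim_equal_matrix_to_list := by
  intro matrix _ hpre
  unfold Spec_matrix_to_list matrix_to_list matrix_to_list_alt
  obtain ⟨hne, hlen⟩ := hpre
  have hget0 : PySem.List.pyGetD matrix 0 [] = matrix.headD [] := by
    cases matrix with
    | nil => exact absurd rfl hne
    | cons a t => simp [PySem.List.pyGetD_zero_cons]
  rw [hget0, goB_eq _ _ _ hlen]
  have hB : numFrom 1 (colsOf matrix (matrix.headD []).length).flatten
      = ((colsOf matrix (matrix.headD []).length).foldl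
          (fun st col => col.foldl (fun s v => (s.1 ++ [(s.2, v)], s.2 + 1)) st)
          ([], 1)).1 := by
    rw [outerFold]; simp
  rw [hB]
  apply congrArg Prod.fst
  have houter := PySem.List.pyRange_one 0 (((matrix.headD []).length : Nat) : Int)
  simp only [Int.sub_zero, Int.toNat_natCast] at houter
  rw [houter, List.foldl_map]
  unfold colsOf
  rw [List.foldl_map]
  apply PySem.List.foldl_congr_mem
  intro st j _
  rw [PySem.List.foldl_pyRange_zero_pyGetD' matrix []
        (fun acc r => (acc.1 ++ [(acc.2, PySem.List.pyGetD r ((0 : Int) + (j : Int)) 0)], acc.2 + 1)) st]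
  rw [List.foldl_map]
  apply PySem.List.foldl_congr_mem
  intro st2 r _
  rw [Int.zero_add, PySem.List.pyGetD_natCast]
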